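-- pv_equiv track=rewrite | github.com/Kristobal-Khunta/Algorithms | yandex_algo_course/week5/taskE.py | find_min_subseq
-- ===== SOURCE A (Python) =====
-- def find_min_subseq(seq, K):
--     """
--     Двигаем правый указатель, до тех пор пока не найдем последовательность,
--     в которой есть все цвета. затем будем поддерживать это условие.
--
--     """
--     counter = {}
--     best_idx_subseq = [0, len(seq)]
--     l_idx = 0
--     for r_idx in range(len(seq)):
--         if seq[r_idx] not in counter:
--             counter[seq[r_idx]] = 0
--         counter[seq[r_idx]] += 1
--         if len(counter) == K:
--             while l_idx < r_idx:
--                 if counter[seq[l_idx]] == 1: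
--                     break
--                 counter[seq[l_idx]] -= 1
--                 l_idx += 1
--             if r_idx - l_idx < best_idx_subseq[1] - best_idx_subseq[0]:
--                 best_idx_subseq = [l_idx, r_idx]
--     return best_idx_subseq
-- ===== SOURCE B (Python) =====
-- def find_min_subseq(seq, K):
--     best = [0, len(seq)]
--     last = {}
--     distinct = 0
--     for r, c in enumerate(seq):
--         if c not in last:
--             distinct += 1
--         last[c] = r
--         if distinct == K:
--             l = min(last.values())
--             if r - l < best[1] - best[0]:
--                 best = [l, r]
--     return best
-- ===== Notes on version B (the rewrite author's own statement) =====
-- stated objective: alternative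
-- what changed: Replaces A's per-color count dict with a left pointer that is shrunk by an inner while loop by a dict of last-occurrence indices plus a running distinct count, reading the window's left end off as min(last.values()) whenever the distinct count equals K.
import Mathlib
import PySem

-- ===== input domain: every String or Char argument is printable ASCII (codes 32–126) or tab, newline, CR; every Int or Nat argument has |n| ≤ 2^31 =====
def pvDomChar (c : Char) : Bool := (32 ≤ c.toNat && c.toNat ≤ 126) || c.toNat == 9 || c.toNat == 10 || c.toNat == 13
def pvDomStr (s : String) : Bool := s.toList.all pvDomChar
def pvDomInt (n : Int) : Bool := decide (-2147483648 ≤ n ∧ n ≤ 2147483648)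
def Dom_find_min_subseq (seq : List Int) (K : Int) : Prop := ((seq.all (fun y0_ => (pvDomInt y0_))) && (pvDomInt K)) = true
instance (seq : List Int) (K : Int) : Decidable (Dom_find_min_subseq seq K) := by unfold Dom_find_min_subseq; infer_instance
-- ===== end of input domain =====

-- B replaces A's count-dict-plus-left-pointer shrinking by a last-occurrence dict with a running
-- distinct count, taking min(last.values()) as the window's left end; alternative decomposition, not claimed faster.

-- B replaces A's count-dict-plus-moving-left-pointer by a last-occurrence dict with a running
-- distinct count, taking min(last.values()) as the window's left end each time; alternative decomposition, not claimed faster.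

-- ===== PORT A =====
-- the inner 'while l_idx < r_idx: …' loop of A
def pvAWhile (seq : List Int) (counter : PySem.Dict Int Int) (l r : Nat) : PySem.Dict Int Int × Nat :=
  if h : l < r then
    if counter.getD (seq.getD l 0) 0 = 1 then (counter, l)
    else pvAWhile seq (counter.insert (seq.getD l 0) (counter.getD (seq.getD l 0) 0 - 1)) (l + 1) r
  else (counter, l)
termination_by r - l
decreasing_by omega
-- the 'for r_idx in range(len(seq)): …' loop of A (rest = seq[r:], r = current index)
def pvALoop (seq : List Int) (K : Int) (rest : List Int) (r : Nat)
    (counter : PySem.Dict Int Int) (l : Nat) (best : Nat × Nat) : Nat × Nat :=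
  match rest with
  | [] => best
  | c :: rest' =>
    let counter1 := if counter.contains c then counter else counter.insert c 0
    let counter2 := counter1.insert c (counter1.getD c 0 + 1)
    if (counter2.size : Int) = K then
      let res := pvAWhile seq counter2 l r
      let best1 := if (r : Int) - (res.2 : Int) < (best.2 : Int) - (best.1 : Int) then (res.2, r) else best
      pvALoop seq K rest' (r + 1) res.1 res.2 best1
    else pvALoop seq K rest' (r + 1) counter2 l best
def find_min_subseq (seq : List Int) (K : Int) : List Int :=
  let b := pvALoop seq K seq 0 PySem.Dict.empty 0 (0, seq.length)
  [(b.1 : Int), (b.2 : Int)]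

-- ===== PORT B =====
-- the 'for r, c in enumerate(seq): …' loop of B (rest = seq[r:], r = current index)
def pvBLoop (K : Int) (rest : List Int) (r : Nat)
    (last : PySem.Dict Int Nat) (distinct : Int) (best : Nat × Nat) : Nat × Nat :=
  match rest with
  | [] => best
  | c :: rest' =>
    let distinct1 := if last.contains c then distinct else distinct + 1
    let last1 := last.insert c r
    if distinct1 = K then
      let l := (PySem.List.min? last1.values (fun x => x)).getD 0
      let best1 := if (r : Int) - (l : Int) < (best.2 : Int) - (best.1 : Int) then (l, r) else best
      pvBLoop K rest' (r + 1) last1 distinct1 best1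
    else pvBLoop K rest' (r + 1) last1 distinct1 best
def find_min_subseq_alt (seq : List Int) (K : Int) : List Int :=
  let b := pvBLoop K seq 0 PySem.Dict.empty 0 (0, seq.length)
  [(b.1 : Int), (b.2 : Int)]

-- ===== PRECONDITION & SPEC =====
def Spec_find_min_subseq (seq : List Int) (K : Int) (out : List Int) : Prop := out = find_min_subseq_alt seq K
instance (seq : List Int) (K : Int) (out : List Int) : Decidable (Spec_find_min_subseq seq K out) := by unfold Spec_find_min_subseq; infer_instance

-- ===== CLAIM (what is proved, stated in full; the proofs are below) =====
def Claim_equal_find_min_subseq : Prop := ∀ (seq : List Int) (K : Int), Dom_find_min_subseq seq K → Spec_find_min_subseq seq K (find_min_subseq seq K)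

-- ===== LEMMAS AND PROOFS =====

-- index of the last occurrence of c in a list (none if absent)
def pvLastOcc : List Int → Int → Option Nat
  | [], _ => none
  | a :: t, c =>
    match pvLastOcc t c with
    | some j => some (j + 1)
    | none => if a = c then some 0 else none

theorem pvLastOcc_append_singleton (pre : List Int) (x c : Int) :
    pvLastOcc (pre ++ [x]) c = if c = x then some pre.length else pvLastOcc pre c := by
  induction pre with
  | nil =>
    rcases eq_or_ne c x with h | h
    · subst h; simp [pvLastOcc]
    · simp [pvLastOcc, h, Ne.symm h]
  | cons a t ih =>
    simp only [List.cons_append, pvLastOcc, ih, List.length_cons]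
    rcases eq_or_ne c x with h | h <;> simp [h]

theorem pvLastOcc_spec {pre : List Int} {c : Int} {j : Nat} (h : pvLastOcc pre c = some j) :
    ∃ hj : j < pre.length, pre[j] = c ∧ c ∉ pre.drop (j + 1) := by
  induction pre using List.reverseRecOn generalizing j with
  | nil => simp [pvLastOcc] at h
  | append_singleton pre' x ih =>
    rw [pvLastOcc_append_singleton] at h
    rcases eq_or_ne c x with hcx | hcx
    · subst hcx
      rw [if_pos rfl] at h
      injection h with h
      subst h
      refine ⟨by simp, ?_, ?_⟩
      · simp
      · rw [List.drop_of_length_le (by simp)]; simp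
    · rw [if_neg hcx] at h
      obtain ⟨hj, hc, hno⟩ := ih h
      refine ⟨by simp; omega, ?_, ?_⟩
      · rw [List.getElem_append_left hj]; exact hc
      · rw [List.drop_append_of_le_length (by omega)]
        simp only [List.mem_append, List.mem_singleton]
        rintro (hmem | rfl)
        · exact hno hmem
        · exact hcx rfl

theorem pvLastOcc_isSome {pre : List Int} {c : Int} (h : c ∈ pre) :
    ∃ j, pvLastOcc pre c = some j := by
  induction pre using List.reverseRecOn with
  | nil => simp at h
  | append_singleton pre' x ih =>
    rw [pvLastOcc_append_singleton]
    rcases eq_or_ne c x with hcx | hcx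
    · exact ⟨pre'.length, by simp [hcx]⟩
    · rw [if_neg hcx]
      exact ih (by simpa [hcx] using h)

theorem pvLastOcc_eq_of {pre : List Int} {c : Int} {j : Nat} (hj : j < pre.length)
    (hc : pre[j] = c) (hno : c ∉ pre.drop (j + 1)) : pvLastOcc pre c = some j := by
  induction pre using List.reverseRecOn generalizing j with
  | nil => simp at hj
  | append_singleton pre' x ih =>
    rw [pvLastOcc_append_singleton]
    rcases Nat.lt_or_ge j pre'.length with hlt | hge
    · have hxmem : x ∈ (pre' ++ [x]).drop (j + 1) := by
        rw [List.drop_append_of_le_length (by omega)]; simp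
      have hcx : c ≠ x := fun hc' => hno (hc' ▸ hxmem)
      rw [if_neg hcx]
      apply ih hlt
      · rw [List.getElem_append_left hlt] at hc; exact hc
      · intro hmem
        exact hno (by rw [List.drop_append_of_le_length (by omega)]; exact List.mem_append_left _ hmem)
    · have hj' : j = pre'.length := by simp at hj; omega
      subst hj'
      have : (pre' ++ [x])[pre'.length] = x := by simp
      rw [this] at hc
      simp [← hc]

theorem pvMemDrop {pre : List Int} {c : Int} {i : Nat} :
    c ∈ pre.drop i ↔ ∃ m, i ≤ m ∧ ∃ hm : m < pre.length, pre[m] = c := by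
  rw [List.mem_iff_getElem]
  constructor
  · rintro ⟨k, hk, heq⟩
    rw [List.getElem_drop] at heq
    have := hk; rw [List.length_drop] at this
    exact ⟨i + k, by omega, by omega, heq⟩
  · rintro ⟨m, him, hm, heq⟩
    refine ⟨m - i, by rw [List.length_drop]; omega, ?_⟩
    rw [List.getElem_drop]
    have : i + (m - i) = m := by omega
    simp only [this]; exact heq

theorem pvLastOcc_ge {pre : List Int} {c : Int} {i j : Nat}
    (hmem : c ∈ pre.drop i) (h : pvLastOcc pre c = some j) : i ≤ j := by
  obtain ⟨m, him, hm, heq⟩ := pvMemDrop.mp hmem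
  obtain ⟨hj, _, hno⟩ := pvLastOcc_spec h
  by_contra hij
  exact hno (pvMemDrop.mpr ⟨m, by omega, hm, heq⟩)

theorem pvMin?_eq_some {xs : List Nat} {m : Nat} (hm : m ∈ xs) (hle : ∀ y ∈ xs, m ≤ y) :
    PySem.List.min? xs (fun x => x) = some m := by
  cases h : PySem.List.min? xs (fun x => x) with
  | none =>
    rw [PySem.List.min?_eq_none_iff] at h
    subst h; simp at hm
  | some m' =>
    have h1 : m' ∈ xs := PySem.List.min?_mem h
    have h2 : m' ≤ m := PySem.List.min?_isMin h m hm
    have h3 : m ≤ m' := hle m' h1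
    simp [Nat.le_antisymm h2 h3]
theorem pvAWhile_spec (n : Nat) : ∀ (l r : Nat) (seq pre : List Int) (counter : PySem.Dict Int Int),
    r - l = n →
    pre.length = r + 1 →
    (∀ i, i < r → seq.getD i 0 = pre.getD i 0) →
    (∀ c ∈ pre, counter.getD c 0 = ((pre.drop l).count c : Int)) →
    (∀ c ∈ pre, c ∈ pre.drop l) →
    l ≤ r →
    (pvAWhile seq counter l r).1.keys = counter.keys ∧
    l ≤ (pvAWhile seq counter l r).2 ∧
    (pvAWhile seq counter l r).2 ≤ r ∧
    (∀ c ∈ pre, (pvAWhile seq counter l r).1.getD c 0 = ((pre.drop (pvAWhile seq counter l r).2).count c : Int)) ∧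
    (∀ c ∈ pre, c ∈ pre.drop (pvAWhile seq counter l r).2) ∧
    (pre.drop (pvAWhile seq counter l r).2).count (pre.getD (pvAWhile seq counter l r).2 0) = 1 := by
  induction n with
  | zero =>
    intro l r seq pre counter hfuel hlen hseq H1 H2 hlr
    have hlr' : l = r := by omega
    subst hlr'
    rw [pvAWhile, dif_neg (by omega)]
    have hl : l < pre.length := by omega
    have hdrop : pre.drop l = pre[l] :: pre.drop (l + 1) := List.drop_eq_getElem_cons hl
    have hdrop1 : pre.drop (l + 1) = [] := List.drop_of_length_le (by omega)
    refine ⟨rfl, le_refl _, le_refl _, H1, H2, ?_⟩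
    rw [List.getD_eq_getElem pre 0 hl, hdrop, hdrop1]
    simp
  | succ n ih =>
    intro l r seq pre counter hfuel hlen hseq H1 H2 hlr
    have hlr2 : l < r := by omega
    have hl : l < pre.length := by omega
    have hc0 : seq.getD l 0 = pre[l] := by
      rw [hseq l hlr2, List.getD_eq_getElem pre 0 hl]
    have hc0mem : pre[l] ∈ pre := List.getElem_mem hl
    have hdrop : pre.drop l = pre[l] :: pre.drop (l + 1) := List.drop_eq_getElem_cons hl
    rw [pvAWhile, dif_pos hlr2]
    by_cases hone : counter.getD (seq.getD l 0) 0 = 1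
    · rw [if_pos hone]
      refine ⟨rfl, le_refl _, by omega, H1, H2, ?_⟩
      rw [List.getD_eq_getElem pre 0 hl]
      have := H1 pre[l] hc0mem
      rw [hc0] at hone
      rw [this] at hone
      exact_mod_cast hone
    · rw [if_neg hone]
      rw [hc0] at hone ⊢
      -- count of pre[l] in the window is at least 2
      have hcnt1 : 0 < (pre.drop l).count pre[l] := List.count_pos_iff.mpr (H2 _ hc0mem)
      have hcnt2 : (pre.drop l).count pre[l] ≠ 1 := by
        intro hx
        apply hone
        rw [H1 pre[l] hc0mem, hx]
        rfl
      have hcntsplit : (pre.drop l).count pre[l] = (pre.drop (l + 1)).count pre[l] + 1 := by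
        rw [hdrop, List.count_cons_self]
      have hcnt3 : 0 < (pre.drop (l + 1)).count pre[l] := by omega
      have H1' : ∀ c ∈ pre,
          (counter.insert pre[l] (counter.getD pre[l] 0 - 1)).getD c 0 = ((pre.drop (l + 1)).count c : Int) := by
        intro c hc
        by_cases hcc : c = pre[l]
        · subst hcc
          rw [PySem.Dict.getD_insert, if_pos rfl, H1 _ hc, hcntsplit]
          push_cast
          ring
        · rw [PySem.Dict.getD_insert_of_ne _ _ _ hcc, H1 c hc, hdrop,
            List.count_cons_of_ne (fun h => hcc h.symm)]
      have H2' : ∀ c ∈ pre, c ∈ pre.drop (l + 1) := by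
        intro c hc
        by_cases hcc : c = pre[l]
        · subst hcc; exact List.count_pos_iff.mp hcnt3
        · have := H2 c hc
          rw [hdrop] at this
          rcases List.mem_cons.mp this with h | h
          · exact absurd h hcc
          · exact h
      obtain ⟨k1, k2, k3, k4, k5, k6⟩ :=
        ih (l + 1) r seq pre (counter.insert pre[l] (counter.getD pre[l] 0 - 1))
          (by omega) hlen hseq H1' H2' (by omega)
      have hcont : counter.contains pre[l] = true := by
        rw [PySem.Dict.contains_eq_isSome_get?]
        cases hg : counter.get? pre[l] with
        | none =>
          have := H1 pre[l] hc0mem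
          rw [PySem.Dict.getD_eq_get?_getD, hg] at this
          simp at this
          omega
        | some v => rfl
      refine ⟨?_, by omega, k3, k4, k5, k6⟩
      rw [k1, PySem.Dict.keys_insert_of_contains _ _ hcont]
theorem pvKeysLenGen {κ ν : Type} (d : PySem.Dict κ ν) : d.keys.length = d.size := by
  simp [PySem.Dict.keys, PySem.Dict.size]

theorem pvLoop_eq : ∀ (rest : List Int) (K : Int) (pre : List Int)
    (counter : PySem.Dict Int Int) (last : PySem.Dict Int Nat) (l : Nat) (distinct : Int) (best : Nat × Nat),
    counter.keys = last.keys →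
    last.keys.Nodup →
    (∀ c : Int, c ∈ last.keys ↔ c ∈ pre) →
    (∀ c : Int, last.get? c = pvLastOcc pre c) →
    (∀ c ∈ pre, counter.getD c 0 = ((pre.drop l).count c : Int)) →
    (∀ c ∈ pre, c ∈ pre.drop l) →
    l ≤ pre.length →
    distinct = (last.keys.length : Int) →
    pvALoop (pre ++ rest) K rest pre.length counter l best
      = pvBLoop K rest pre.length last distinct best := by
  intro rest
  induction rest with
  | nil => intros; rw [pvALoop, pvBLoop]
  | cons c rest' ih =>
    intro K pre counter last l distinct best hkeys hnd hmemk hget H1 H2 hl hdist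
    have hcontc : counter.contains c = last.contains c := by
      rw [Bool.eq_iff_iff, PySem.Dict.contains_iff_mem_keys, PySem.Dict.contains_iff_mem_keys, hkeys]
    have hdropapp : (pre ++ [c]).drop l = pre.drop l ++ [c] := List.drop_append_of_le_length hl
    have hlenapp : (pre ++ [c]).length = pre.length + 1 := by simp
    -- abbreviations matching the loop bodies
    have hkeys2 :
        ((if counter.contains c then counter else counter.insert c 0).insert c
          ((if counter.contains c then counter else counter.insert c 0).getD c 0 + 1)).keys
        = (last.insert c pre.length).keys := by
      by_cases hcon : counter.contains c = true
      · rw [if_pos hcon, PySem.Dict.keys_insert_of_contains _ _ hcon,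
          PySem.Dict.keys_insert_of_contains _ _ (by rw [hcontc] at hcon; exact hcon), hkeys]
      · have hcon' : counter.contains c = false := by simpa using hcon
        have hlcon' : last.contains c = false := by rw [← hcontc]; exact hcon'
        have hmem1 : (counter.insert c 0).contains c = true := by
          rw [PySem.Dict.contains_iff_mem_keys, PySem.Dict.keys_insert_of_not_contains _ _ hcon']
          simp
        rw [if_neg (by simp [hcon']), PySem.Dict.keys_insert_of_contains _ _ hmem1,
          PySem.Dict.keys_insert_of_not_contains _ _ hcon',
          PySem.Dict.keys_insert_of_not_contains _ _ hlcon', hkeys]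
    have hnd2 : (last.insert c pre.length).keys.Nodup := PySem.Dict.nodup_keys_insert _ _ _ hnd
    have hmemk2 : ∀ d : Int, d ∈ (last.insert c pre.length).keys ↔ d ∈ pre ++ [c] := by
      intro d
      by_cases hlcon : last.contains c = true
      · rw [PySem.Dict.keys_insert_of_contains _ _ hlcon]
        have hcpre : c ∈ pre := (hmemk c).mp ((PySem.Dict.contains_iff_mem_keys _ _).mp hlcon)
        rw [hmemk d]
        simp only [List.mem_append, List.mem_singleton]
        constructor
        · exact Or.inl
        · rintro (h | rfl)
          · exact h
          · exact hcpre
      · have hlcon' : last.contains c = false := by simpa using hlcon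
        rw [PySem.Dict.keys_insert_of_not_contains _ _ hlcon']
        simp [hmemk d]
    have hget2 : ∀ d : Int, (last.insert c pre.length).get? d = pvLastOcc (pre ++ [c]) d := by
      intro d
      rw [pvLastOcc_append_singleton]
      by_cases hdc : d = c
      · subst hdc
        rw [PySem.Dict.get?_insert_self, if_pos rfl]
      · rw [PySem.Dict.get?_insert_of_ne _ _ hdc, if_neg hdc, hget d]
    have hc1getD :
        (if counter.contains c then counter else counter.insert c 0).getD c 0
          = ((pre.drop l).count c : Int) := by
      by_cases hc : c ∈ pre
      · rw [if_pos ((PySem.Dict.contains_iff_mem_keys _ _).mpr (by rw [hkeys]; exact (hmemk c).mpr hc))]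
        exact H1 c hc
      · have hcon' : counter.contains c = false := by
          rw [← Bool.not_eq_true, PySem.Dict.contains_iff_mem_keys, hkeys]
          exact fun h => hc ((hmemk c).mp h)
        rw [if_neg (by simp [hcon']), PySem.Dict.getD_insert, if_pos rfl,
          List.count_eq_zero.mpr (fun h => hc (List.mem_of_mem_drop h))]
        rfl
    have H1b : ∀ d ∈ pre ++ [c],
        ((if counter.contains c then counter else counter.insert c 0).insert c
          ((if counter.contains c then counter else counter.insert c 0).getD c 0 + 1)).getD d 0
          = (((pre ++ [c]).drop l).count d : Int) := by
      intro d hd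
      rw [hdropapp]
      by_cases hdc : d = c
      · subst hdc
        rw [PySem.Dict.getD_insert, if_pos rfl, hc1getD, List.count_append, List.count_singleton]
        simp
      · have hcount : (pre.drop l ++ [c]).count d = (pre.drop l).count d := by
          simp [List.count_append, Ne.symm hdc]
        rw [PySem.Dict.getD_insert_of_ne _ _ _ hdc, hcount]
        have hd' : d ∈ pre := by
          rcases List.mem_append.mp hd with h | h
          · exact h
          · exact absurd (List.mem_singleton.mp h) hdc
        by_cases hcon : counter.contains c = true
        · rw [if_pos hcon]; exact H1 d hd'
        · rw [if_neg (by simpa using hcon), PySem.Dict.getD_insert_of_ne _ _ _ hdc]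
          exact H1 d hd'
    have H2b : ∀ d ∈ pre ++ [c], d ∈ (pre ++ [c]).drop l := by
      intro d hd
      rw [hdropapp]
      rcases List.mem_append.mp hd with h | h
      · exact List.mem_append_left _ (H2 d h)
      · exact List.mem_append_right _ h
    have hdist2 : (if last.contains c then distinct else distinct + 1)
        = ((last.insert c pre.length).keys.length : Int) := by
      by_cases hlcon : last.contains c = true
      · rw [if_pos hlcon, PySem.Dict.keys_insert_of_contains _ _ hlcon, hdist]
      · have hlcon' : last.contains c = false := by simpa using hlcon
        rw [if_neg (by simp [hlcon']), PySem.Dict.keys_insert_of_not_contains _ _ hlcon', hdist]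
        simp
    have hsize2 :
        (((if counter.contains c then counter else counter.insert c 0).insert c
          ((if counter.contains c then counter else counter.insert c 0).getD c 0 + 1)).size : Int)
        = (if last.contains c then distinct else distinct + 1) := by
      rw [← pvKeysLenGen, hkeys2, hdist2]
    -- unfold one step of both loops
    rw [pvALoop, pvBLoop]
    simp only []
    rw [hsize2]
    by_cases hK : (if last.contains c then distinct else distinct + 1) = K
    · rw [if_pos hK, if_pos hK]
      -- the while loop: apply its specification over the prefix pre ++ [c]
      have hseqget : ∀ i, i < pre.length →
          (pre ++ c :: rest').getD i 0 = (pre ++ [c]).getD i 0 := by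
        intro i hi
        rw [List.getD_append _ _ _ i hi, List.getD_append _ _ _ i hi]
      obtain ⟨k1, k2, k3, k4, k5, k6⟩ :=
        pvAWhile_spec (pre.length - l) l pre.length (pre ++ c :: rest') (pre ++ [c])
          ((if counter.contains c then counter else counter.insert c 0).insert c
            ((if counter.contains c then counter else counter.insert c 0).getD c 0 + 1))
          (by omega) hlenapp hseqget H1b H2b hl
      set res := pvAWhile (pre ++ c :: rest')
          ((if counter.contains c then counter else counter.insert c 0).insert c
            ((if counter.contains c then counter else counter.insert c 0).getD c 0 + 1)) l pre.length with hres
      -- B's left end equals the result of A's while loop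
      have hres2lt : res.2 < (pre ++ [c]).length := by rw [hlenapp]; omega
      have hc0 : (pre ++ [c]).getD res.2 0 = (pre ++ [c])[res.2] :=
        List.getD_eq_getElem _ 0 hres2lt
      have hdropres : (pre ++ [c]).drop res.2 = (pre ++ [c])[res.2] :: (pre ++ [c]).drop (res.2 + 1) :=
        List.drop_eq_getElem_cons hres2lt
      have hlastocc0 : pvLastOcc (pre ++ [c]) (pre ++ [c])[res.2] = some res.2 := by
        apply pvLastOcc_eq_of hres2lt rfl
        rw [hc0, hdropres, List.count_cons_self] at k6
        exact List.count_eq_zero.mp (by omega)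
      have hvals : (last.insert c pre.length).values
          = (last.insert c pre.length).keys.map (fun k => (last.insert c pre.length).getD k 0) :=
        PySem.Dict.values_eq_map_keys _ hnd2 0
      have hgetDkey : ∀ d : Int, ∀ j : Nat, pvLastOcc (pre ++ [c]) d = some j →
          (last.insert c pre.length).getD d 0 = j := by
        intro d j hj
        rw [PySem.Dict.getD_eq_get?_getD, hget2 d, hj]
        rfl
      have hmin : PySem.List.min? (last.insert c pre.length).values (fun x => x) = some res.2 := by
        apply pvMin?_eq_some
        · rw [hvals]
          apply List.mem_map.mpr
          refine ⟨(pre ++ [c])[res.2], ?_, hgetDkey _ _ hlastocc0⟩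
          exact (hmemk2 _).mpr (List.getElem_mem hres2lt)
        · intro y hy
          rw [hvals] at hy
          obtain ⟨k, hk, hky⟩ := List.mem_map.mp hy
          have hkpre : k ∈ pre ++ [c] := (hmemk2 k).mp hk
          obtain ⟨j, hj⟩ := pvLastOcc_isSome hkpre
          rw [hgetDkey k j hj] at hky
          subst hky
          exact pvLastOcc_ge (k5 k hkpre) hj
      rw [hmin]
      simp only [Option.getD_some]
      -- recurse via the induction hypothesis at prefix pre ++ [c]
      have := ih K (pre ++ [c]) res.1 (last.insert c pre.length) res.2
        (if last.contains c then distinct else distinct + 1)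
        (if (pre.length : Int) - (res.2 : Int) < (best.2 : Int) - (best.1 : Int) then (res.2, pre.length) else best)
        (by rw [k1, hkeys2]) hnd2 hmemk2 hget2 k4 k5 (by omega) hdist2
      rw [List.append_assoc, List.singleton_append] at this
      rw [hlenapp] at this
      exact this
    · rw [if_neg hK, if_neg hK]
      have := ih K (pre ++ [c])
        ((if counter.contains c then counter else counter.insert c 0).insert c
          ((if counter.contains c then counter else counter.insert c 0).getD c 0 + 1))
        (last.insert c pre.length) l
        (if last.contains c then distinct else distinct + 1) best
        hkeys2 hnd2 hmemk2 hget2 H1b H2b (by simp; omega) hdist2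
      rw [List.append_assoc, List.singleton_append] at this
      rw [hlenapp] at this
      exact this

-- ===== VERDICT (by name: the statement is the Claim_ definition above) =====
theorem find_min_subseq_spec : Claim_equal_find_min_subseq := by
  intro seq K _
  unfold Spec_find_min_subseq find_min_subseq find_min_subseq_alt
  have h := pvLoop_eq seq K [] PySem.Dict.empty PySem.Dict.empty 0 0 (0, seq.length)
  simp only [List.nil_append, List.length_nil] at h
  rw [h]
  all_goals simp [PySem.Dict.keys_empty, PySem.Dict.get?_empty, pvLastOcc]
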